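-- pv_equiv track=rewrite | github.com/thtra-TT/BaiTap_ | UI_8_Quan_Xe.py | backtracking_timkiem
-- ===== SOURCE A (Python) =====
-- SO_HANG = 8
--
-- def backtracking_timkiem(dich, n=SO_HANG):
--     buoc = []
--
--     def an_toan(trangthai, row, col):
--         for r, c in trangthai:
--             if c == col:
--                 return False
--         return True
--
--     def thu(row, trangthai):
--         if row == n:
--             if set(trangthai) == set(dich):
--                 buoc.extend([trangthai[:k] for k in range(0, n+1)])
--                 return True
--             return False
--
--         for col in range(n):
--             if an_toan(trangthai, row, col):
--                 trangthai.append((row, col))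
--                 if thu(row + 1, trangthai):
--                     return True
--                 trangthai.pop()
--         return False
--
--     thu(0, [])
--     return buoc
-- ===== SOURCE B (Python) =====
-- SO_HANG = 8
--
-- def backtracking_timkiem(dich, n=SO_HANG):
--     # Direct construction: the search can only succeed on the row-sorted distinct
--     # pairs of dich when they form one rook per row with distinct in-range columns.
--     sol = sorted(set(dich))
--     if [r for r, c in sol] != list(range(n)):
--         return []
--     cols = [c for r, c in sol]
--     if len(set(cols)) != len(cols) or any(c < 0 or c >= n for c in cols):
--         return []
--     return [sol[:k] for k in range(n + 1)]
-- ===== Notes on version B (the rewrite author's own statement) =====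
-- stated objective: alternative
-- what changed: A enumerates rook placements row by row with backtracking until one equals set(dich); B sorts the distinct pairs of dich, validates directly that they form one rook per row with distinct in-range columns, and emits the prefixes.
import Mathlib
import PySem

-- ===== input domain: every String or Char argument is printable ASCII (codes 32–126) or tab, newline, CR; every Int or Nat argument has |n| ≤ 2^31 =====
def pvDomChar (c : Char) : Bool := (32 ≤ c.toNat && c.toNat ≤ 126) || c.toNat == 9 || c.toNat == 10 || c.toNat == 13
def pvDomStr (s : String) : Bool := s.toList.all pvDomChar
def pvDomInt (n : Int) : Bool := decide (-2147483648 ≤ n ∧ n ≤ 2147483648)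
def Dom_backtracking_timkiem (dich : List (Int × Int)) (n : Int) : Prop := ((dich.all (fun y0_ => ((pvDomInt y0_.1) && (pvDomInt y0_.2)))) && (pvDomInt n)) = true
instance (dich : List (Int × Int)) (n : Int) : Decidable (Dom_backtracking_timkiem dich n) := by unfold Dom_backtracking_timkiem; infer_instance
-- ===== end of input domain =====

-- B replaces A's row-by-row backtracking search by a direct sort-and-validate construction
-- of the unique reachable solution (objective: alternative algorithm).

-- ===== PORT A =====
-- an_toan(trangthai, row, col): the 'row' parameter is unused by the Python body and dropped at call sites here.
def pvA_anToan (trangthai : List (Int × Int)) (col : Int) : Bool :=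
  trangthai.all (fun rc => !(rc.2 == col))

-- early-exit encoding of 'if thu(...): return True' inside the for-loop: once the loop
-- has succeeded the remaining columns are not tried.
def pvFirst {α β : Type} (g : α → Option β) (acc : Option β) (x : α) : Option β :=
  match acc with
  | some r => some r
  | none => g x

-- thu(row, trangthai); fuel = (n - row).toNat. The successful final state is returned
-- (Python appends/pops in place and signals success with True; the functional state
-- st ++ [(row, col)] is the same list Python holds at the recursive call).
-- At fuel 0 with row ≠ n (reachable only for n < 0) Python's 'for col in range(n)' body
-- never runs and thu returns False, i.e. none.
def pvA_thu (dich : List (Int × Int)) (n : Int) : Nat → Int → List (Int × Int) → Option (List (Int × Int))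
  | 0, row, st =>
      if row == n then
        (if PySem.Set.equal (PySem.Set.ofList st) (PySem.Set.ofList dich) then some st else none)
      else none
  | fuel + 1, row, st =>
      if row == n then
        (if PySem.Set.equal (PySem.Set.ofList st) (PySem.Set.ofList dich) then some st else none)
      else
        (PySem.List.pyRange 0 n 1).foldl
          (pvFirst (fun col =>
            if pvA_anToan st col then pvA_thu dich n fuel (row + 1) (st ++ [(row, col)])
            else none))
          none

def backtracking_timkiem (dich : List (Int × Int)) (n : Int) : List (List (Int × Int)) :=
  match pvA_thu dich n n.toNat 0 [] with
  | some st => (PySem.List.pyRange 0 (n + 1) 1).map (fun k => PySem.List.slice st none (some k))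
  | none => []

-- ===== PORT B =====
def backtracking_timkiem_alt (dich : List (Int × Int)) (n : Int) : List (List (Int × Int)) :=
  let sol := PySem.List.sorted2 (PySem.Set.ofList dich) Prod.fst Prod.snd
  if sol.map Prod.fst ≠ PySem.List.pyRange 0 n 1 then []
  else
    let cols := sol.map Prod.snd
    if (PySem.Set.ofList cols).length ≠ cols.length ∨
        cols.any (fun c => decide (c < 0) || decide (n ≤ c)) = true then []
    else (PySem.List.pyRange 0 (n + 1) 1).map (fun k => PySem.List.slice sol none (some k))

-- ===== PRECONDITION & SPEC =====
def Spec_backtracking_timkiem (dich : List (Int × Int)) (n : Int) (out : List (List (Int × Int))) : Prop := out = backtracking_timkiem_alt dich n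
instance (dich : List (Int × Int)) (n : Int) (out : List (List (Int × Int))) : Decidable (Spec_backtracking_timkiem dich n out) := by unfold Spec_backtracking_timkiem; infer_instance

-- ===== CLAIM (what is proved, stated in full; the proofs are below) =====
def Claim_equal_backtracking_timkiem : Prop := ∀ (dich : List (Int × Int)) (n : Int), Dom_backtracking_timkiem dich n → Spec_backtracking_timkiem dich n (backtracking_timkiem dich n)

-- ===== LEMMAS AND PROOFS =====

theorem pvA_anToan_iff (st : List (Int × Int)) (col : Int) :
    pvA_anToan st col = true ↔ col ∉ st.map Prod.snd := by
  unfold pvA_anToan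
  rw [List.all_eq_true]
  constructor
  · intro h hmem
    obtain ⟨p, hp, hpe⟩ := List.mem_map.mp hmem
    have h2 := h p hp
    simp only [Bool.not_eq_eq_eq_not, Bool.not_true, beq_eq_false_iff_ne, ne_eq] at h2
    exact h2 hpe
  · intro h p hp
    simp only [Bool.not_eq_eq_eq_not, Bool.not_true, beq_eq_false_iff_ne, ne_eq]
    intro hc
    exact h (List.mem_map.mpr ⟨p, hp, hc⟩)

theorem pv_foldl_opt_acc {α β : Type} (g : α → Option β) (l : List α) (v : β) :
    l.foldl (pvFirst g) (some v) = some v := by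
  induction l with
  | nil => rfl
  | cons x t ih => simpa [pvFirst] using ih

theorem pv_foldl_opt_some {α β : Type} (g : α → Option β) (l : List α) (v : β)
    (h : l.foldl (pvFirst g) none = some v) :
    ∃ x ∈ l, g x = some v := by
  induction l with
  | nil => simp at h
  | cons x t ih =>
    simp only [List.foldl_cons, pvFirst] at h
    cases hx : g x with
    | some w =>
      rw [hx, pv_foldl_opt_acc] at h
      exact ⟨x, by simp, hx.trans h⟩
    | none =>
      rw [hx] at h
      obtain ⟨y, hy, hgy⟩ := ih h
      exact ⟨y, by simp [hy], hgy⟩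

theorem pv_foldl_opt_first {α β : Type} (g : α → Option β) (l : List α) (c : α) (v : β)
    (hc : c ∈ l) (hg : g c = some v) (hother : ∀ x ∈ l, x ≠ c → g x = none) :
    l.foldl (pvFirst g) none = some v := by
  induction l with
  | nil => simp at hc
  | cons x t ih =>
    simp only [List.foldl_cons, pvFirst]
    by_cases hxc : x = c
    · subst hxc; rw [hg]; exact pv_foldl_opt_acc g t v
    · rw [hother x (by simp) hxc]
      have hct : c ∈ t := by
        cases List.mem_cons.mp hc with
        | inl h => exact absurd h.symm hxc
        | inr h => exact h
      exact ih hct (fun y hy hyc => hother y (by simp [hy]) hyc)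

theorem pv_foldl_add_sublist {α : Type} [BEq α] (xs s : List α) :
    List.Sublist (xs.foldl PySem.Set.add s) (s ++ xs) := by
  induction xs generalizing s with
  | nil => simp
  | cons x t ih =>
    simp only [List.foldl_cons, PySem.Set.add]
    split
    · exact (ih s).trans (by simp)
    · simpa using (ih (s ++ [x])).trans (by simp)

theorem pv_ofList_sublist {α : Type} [BEq α] (xs : List α) :
    List.Sublist (PySem.Set.ofList xs) xs := by
  simpa [PySem.Set.ofList_eq_foldl] using pv_foldl_add_sublist xs ([] : List α)

theorem pv_nodup_of_ofList_length {α : Type} [BEq α] [LawfulBEq α] (xs : List α)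
    (h : (PySem.Set.ofList xs).length = xs.length) : xs.Nodup := by
  have h2 := (pv_ofList_sublist xs).eq_of_length h
  rw [← h2]; exact PySem.Set.nodup_ofList xs

theorem pv_set_equal_iff (xs ys : List (Int × Int)) :
    PySem.Set.equal (PySem.Set.ofList xs) (PySem.Set.ofList ys) = true ↔
      ∀ a : Int × Int, a ∈ xs ↔ a ∈ ys := by
  simp only [PySem.Set.equal, PySem.Set.issubset, PySem.Set.contains, Bool.and_eq_true,
    List.all_eq_true, List.contains_iff_mem, PySem.Set.mem_ofList]
  constructor
  · rintro ⟨h1, h2⟩ a; exact ⟨fun ha => h1 a ha, fun ha => h2 a ha⟩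
  · intro h; exact ⟨fun a ha => (h a).mp ha, fun a ha => (h a).mpr ha⟩

theorem pv_sorted2_eq_sorted_lex (xs : List (Int × Int)) :
    PySem.List.sorted2 xs Prod.fst Prod.snd =
      PySem.List.sorted xs (fun p => (toLex p : Lex (Int × Int))) := by
  simp only [PySem.List.sorted2, PySem.List.sorted, if_neg (by decide : ¬(false = true))]
  have hb : (fun (a b : Int × Int) =>
        decide (a.1 < b.1) || (!decide (b.1 < a.1) && decide (a.2 < b.2)))
      = (fun (a b : Int × Int) =>
        decide ((toLex a : Lex (Int × Int)) < toLex b)) := by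
    funext a b
    rw [Bool.eq_iff_iff]
    simp only [Bool.or_eq_true, Bool.and_eq_true, Bool.not_eq_true', decide_eq_true_eq,
      decide_eq_false_iff_not, Prod.Lex.toLex_lt_toLex]
    omega
  rw [hb]

theorem pv_sorted2_eq_of_perm_of_pairwise_fst_lt (xs ys : List (Int × Int))
    (hperm : ys.Perm xs) (hp : ys.Pairwise (fun a b => a.1 < b.1)) :
    PySem.List.sorted2 xs Prod.fst Prod.snd = ys := by
  rw [pv_sorted2_eq_sorted_lex]
  exact PySem.List.sorted_eq_of_perm_of_pairwise_lt xs ys _ hperm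
    (hp.imp (fun h => Prod.Lex.toLex_lt_toLex.mpr (Or.inl h)))

theorem pvA_sound (dich : List (Int × Int)) (n : Int) :
    ∀ (fuel : Nat) (row : Int) (st res : List (Int × Int)),
      (st.map Prod.snd).Nodup →
      pvA_thu dich n fuel row st = some res →
      ∃ ext, res = st ++ ext ∧ row + ext.length = n ∧
        ext.map Prod.fst = PySem.List.pyRange row (row + ext.length) 1 ∧
        (∀ p ∈ ext, 0 ≤ p.2 ∧ p.2 < n) ∧
        (res.map Prod.snd).Nodup ∧
        PySem.Set.equal (PySem.Set.ofList res) (PySem.Set.ofList dich) = true := by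
  intro fuel
  induction fuel with
  | zero =>
    intro row st res hnd h
    simp only [pvA_thu] at h
    by_cases hrow : row = n
    · subst hrow
      rw [if_pos (by simp)] at h
      split at h
      · obtain rfl : st = res := by injection h
        refine ⟨[], by simp, by simp, by simp [PySem.List.pyRange_one_eq_nil le_rfl], by simp, hnd, by assumption⟩
      · exact absurd h (by simp)
    · rw [if_neg (by simpa using hrow)] at h; exact absurd h (by simp)
  | succ fuel ih =>
    intro row st res hnd h
    simp only [pvA_thu] at h
    by_cases hrow : row = n
    · subst hrow
      rw [if_pos (by simp)] at h
      split at h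
      · obtain rfl : st = res := by injection h
        refine ⟨[], by simp, by simp, by simp [PySem.List.pyRange_one_eq_nil le_rfl], by simp, hnd, by assumption⟩
      · exact absurd h (by simp)
    · rw [if_neg (by simpa using hrow)] at h
      obtain ⟨col, hcol, hg⟩ := pv_foldl_opt_some _ _ _ h
      rw [PySem.List.mem_pyRange_one] at hcol
      split at hg
      next hsafe =>
        have hnotmem : col ∉ st.map Prod.snd := (pvA_anToan_iff st col).mp hsafe
        have hnd' : ((st ++ [(row, col)]).map Prod.snd).Nodup := by
          rw [List.map_append, List.nodup_append]
          refine ⟨hnd, by simp, ?_⟩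
          intro a ha b hb2
          simp only [List.map_cons, List.map_nil, List.mem_singleton] at hb2
          subst hb2
          exact fun heq => hnotmem (heq ▸ ha)
        obtain ⟨ext', hres, hlen, hfst, hbnd, hndres, heq⟩ := ih (row + 1) (st ++ [(row, col)]) res hnd' hg
        refine ⟨(row, col) :: ext', by simpa using hres,
          by simp only [List.length_cons]; push_cast at hlen ⊢; omega, ?_, ?_, hndres, heq⟩
        · have he : row + (((row, col) :: ext').length : Int) = (row + 1) + ext'.length := by
            simp only [List.length_cons]; push_cast; omega
          rw [List.map_cons, he, PySem.List.pyRange_one_cons (by omega), hfst]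
        · rintro p hp
          rcases List.mem_cons.mp hp with rfl | hp'
          · exact ⟨hcol.1, hcol.2⟩
          · exact hbnd p hp'
      next => exact absurd hg (by simp)

theorem pvA_complete (dich : List (Int × Int)) (n : Int) (F : List (Int × Int))
    (hlen : (F.length : Int) = n)
    (hmem : ∀ a : Int × Int, a ∈ F ↔ a ∈ dich)
    (hfst : F.map Prod.fst = PySem.List.pyRange 0 n 1)
    (hsnd : (F.map Prod.snd).Nodup)
    (hbnd : ∀ c ∈ F.map Prod.snd, 0 ≤ c ∧ c < n) :
    ∀ fuel : Nat, fuel ≤ F.length →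
      pvA_thu dich n fuel ((n : Int) - fuel) (F.take (F.length - fuel)) = some F := by
  intro fuel
  induction fuel with
  | zero =>
    intro _
    have hF : F.take (F.length - 0) = F := by simp
    rw [hF]
    simp only [pvA_thu, Nat.cast_zero, sub_zero, beq_self_eq_true, if_true,
      (pv_set_equal_iff F dich).mpr hmem]
  | succ fuel ih =>
    intro hle
    have hrowne : ((n : Int) - ((fuel + 1 : Nat) : Int)) ≠ n := by push_cast; omega
    simp only [pvA_thu]
    rw [if_neg (by simpa using hrowne)]
    have hmlt : F.length - (fuel + 1) < F.length := by omega
    have hmfstlt : F.length - (fuel + 1) < (F.map Prod.fst).length := by simpa using hmlt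
    have hmsndlt : F.length - (fuel + 1) < (F.map Prod.snd).length := by simpa using hmlt
    have h1 : F[F.length - (fuel + 1)].1 = ((F.length - (fuel + 1) : Nat) : Int) := by
      have e1 := List.getElem_of_eq hfst hmfstlt
      rw [List.getElem_map] at e1
      rw [e1, PySem.List.getElem_pyRange_one]
      omega
    have hrow : ((n : Int) - ((fuel + 1 : Nat) : Int)) = ((F.length - (fuel + 1) : Nat) : Int) := by
      push_cast; omega
    have hcmem : F[F.length - (fuel + 1)].2 ∈ F.map Prod.snd := by
      exact List.mem_map.mpr ⟨F[F.length - (fuel + 1)], List.getElem_mem hmlt, rfl⟩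
    have hcbnd := hbnd _ hcmem
    -- the only column that can extend the prefix is F[m].2
    apply pv_foldl_opt_first _ _ (F[F.length - (fuel + 1)].2) F
      (PySem.List.mem_pyRange_one.mpr ⟨hcbnd.1, hcbnd.2⟩)
    · -- g c* = some F
      have hsafe : pvA_anToan (F.take (F.length - (fuel + 1))) F[F.length - (fuel + 1)].2 = true := by
        rw [pvA_anToan_iff, List.map_take]
        intro hmem'
        have hdrop : (F.map Prod.snd).drop (F.length - (fuel + 1)) =
            (F.map Prod.snd)[F.length - (fuel + 1)] :: (F.map Prod.snd).drop (F.length - (fuel + 1) + 1) :=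
          List.drop_eq_getElem_cons hmsndlt
        have hsplit := List.take_append_drop (F.length - (fuel + 1)) (F.map Prod.snd)
        have hnd2 := hsnd
        rw [← hsplit, List.nodup_append] at hnd2
        exact hnd2.2.2 _ hmem' _ (by rw [hdrop]; simp) rfl
      rw [if_pos hsafe]
      have hFm : ((n : Int) - ((fuel + 1 : Nat) : Int), F[F.length - (fuel + 1)].2) = F[F.length - (fuel + 1)] := by
        rw [hrow, ← h1]
      have htake : F.take (F.length - (fuel + 1)) ++ [F[F.length - (fuel + 1)]] =
          F.take (F.length - (fuel + 1) + 1) := by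
        rw [List.take_add_one, List.getElem?_eq_getElem hmlt]
        rfl
      rw [hFm, htake]
      have e2 : F.length - (fuel + 1) + 1 = F.length - fuel := by omega
      have e3 : (n : Int) - ((fuel + 1 : Nat) : Int) + 1 = (n : Int) - (fuel : Nat) := by push_cast; omega
      rw [e2, e3]
      exact ih (by omega)
    · -- every other column fails
      intro col hcolmem hne
      split
      next hsafe =>
        cases hopt : pvA_thu dich n fuel ((n : Int) - ((fuel + 1 : Nat) : Int) + 1)
            (F.take (F.length - (fuel + 1)) ++ [((n : Int) - ((fuel + 1 : Nat) : Int), col)]) with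
        | none => rfl
        | some res =>
          exfalso
          have hndtake : ((F.take (F.length - (fuel + 1))).map Prod.snd).Nodup := by
            rw [List.map_take]
            exact hsnd.sublist (List.take_sublist _ _)
          have hnd' : (((F.take (F.length - (fuel + 1)) ++ [((n : Int) - ((fuel + 1 : Nat) : Int), col)]).map Prod.snd)).Nodup := by
            rw [List.map_append, List.nodup_append]
            refine ⟨hndtake, by simp, ?_⟩
            intro a ha b hb2
            simp only [List.map_cons, List.map_nil, List.mem_singleton] at hb2
            subst hb2
            intro heq
            exact ((pvA_anToan_iff _ _).mp hsafe) (heq ▸ ha)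
          obtain ⟨ext, hres, _, _, _, _, heqset⟩ := pvA_sound dich n fuel _ _ res hnd' hopt
          have hmemres : ((n : Int) - ((fuel + 1 : Nat) : Int), col) ∈ res := by
            rw [hres]; simp
          have hmemF : ((n : Int) - ((fuel + 1 : Nat) : Int), col) ∈ F :=
            (hmem _).mpr (((pv_set_equal_iff res dich).mp heqset _).mp hmemres)
          obtain ⟨j, hj, hjeq⟩ := List.getElem_of_mem hmemF
          have hjfst : F[j].1 = ((j : Nat) : Int) := by
            have e1 := List.getElem_of_eq hfst (by simpa using hj)
            rw [List.getElem_map] at e1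
            rw [e1, PySem.List.getElem_pyRange_one]
            omega
          have : (j : Int) = ((F.length - (fuel + 1) : Nat) : Int) := by
            rw [← hjfst, hjeq]
            push_cast at hrow ⊢
            omega
          have hjm : j = F.length - (fuel + 1) := by omega
          apply hne
          subst hjm
          rw [hjeq]
      next => rfl

-- ===== VERDICT (by name: the statement is the Claim_ definition above) =====
theorem backtracking_timkiem_spec : Claim_equal_backtracking_timkiem := by
  intro dich n _
  unfold Spec_backtracking_timkiem
  cases h : pvA_thu dich n n.toNat 0 [] with
  | some res =>
    obtain ⟨ext, hres, hlen0, hfst0, hbnd0, hsnd0, heq0⟩ :=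
      pvA_sound dich n n.toNat 0 [] res (by simp) h
    rw [List.nil_append] at hres
    subst hres
    rw [zero_add] at hlen0 hfst0
    rw [hlen0] at hfst0
    have hnodup : res.Nodup := hsnd0.of_map
    have hperm : res.Perm (PySem.Set.ofList dich) := by
      rw [List.perm_ext_iff_of_nodup hnodup (PySem.Set.nodup_ofList dich)]
      intro a
      rw [PySem.Set.mem_ofList]
      exact (pv_set_equal_iff res dich).mp heq0 a
    have hpair : res.Pairwise (fun a b => a.1 < b.1) := by
      rw [← List.pairwise_map (f := Prod.fst)]
      rw [hfst0]
      exact PySem.List.pairwise_lt_pyRange_one 0 n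
    have hsol : PySem.List.sorted2 (PySem.Set.ofList dich) Prod.fst Prod.snd = res :=
      pv_sorted2_eq_of_perm_of_pairwise_fst_lt _ res hperm hpair
    simp only [backtracking_timkiem, h, backtracking_timkiem_alt, hsol]
    rw [if_neg (by simp [hfst0]), if_neg ?_]
    push Not
    constructor
    · rw [PySem.Set.ofList_eq_self_of_nodup _ hsnd0]
    · have hanyf : ((res.map Prod.snd).any fun c => decide (c < 0) || decide (n ≤ c)) = false := by
        rw [List.any_eq_false]
        intro c hc
        obtain ⟨p, hp, rfl⟩ := List.mem_map.mp hc
        have hb := hbnd0 p hp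
        simp only [Bool.or_eq_true, decide_eq_true_eq]
        omega
      simp [hanyf]
  | none =>
    have hA : backtracking_timkiem dich n = [] := by simp [backtracking_timkiem, h]
    rw [hA]
    simp only [backtracking_timkiem_alt]
    split_ifs with h1 h2
    · rfl
    · rfl
    · by_cases hn : 0 ≤ n
      · exfalso
        push Not at h1
        rw [not_or] at h2
        obtain ⟨h2a, h2b⟩ := h2
        push Not at h2a
        have hperm := PySem.List.sorted2_perm (PySem.Set.ofList dich) Prod.fst Prod.snd false
        have hmem : ∀ a : Int × Int,
            a ∈ PySem.List.sorted2 (PySem.Set.ofList dich) Prod.fst Prod.snd ↔ a ∈ dich := by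
          intro a
          rw [hperm.mem_iff, PySem.Set.mem_ofList]
        have hlen : ((PySem.List.sorted2 (PySem.Set.ofList dich) Prod.fst Prod.snd).length : Int) = n := by
          have := congrArg List.length h1
          rw [List.length_map, PySem.List.length_pyRange_one] at this
          omega
        have hsndN := pv_nodup_of_ofList_length _ h2a
        have hbnd : ∀ c ∈ (PySem.List.sorted2 (PySem.Set.ofList dich) Prod.fst Prod.snd).map Prod.snd,
            0 ≤ c ∧ c < n := by
          intro c hc
          by_contra hcon
          apply h2b
          rw [List.any_eq_true]
          refine ⟨c, hc, ?_⟩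
          simp only [Bool.or_eq_true, decide_eq_true_eq]
          omega
        have hcomp := pvA_complete dich n _ hlen hmem h1 hsndN hbnd
          (PySem.List.sorted2 (PySem.Set.ofList dich) Prod.fst Prod.snd).length le_rfl
        rw [Nat.sub_self, List.take_zero] at hcomp
        have e1 : ((n : Int) - ((PySem.List.sorted2 (PySem.Set.ofList dich) Prod.fst Prod.snd).length : Int)) = 0 := by omega
        have e2 : (PySem.List.sorted2 (PySem.Set.ofList dich) Prod.fst Prod.snd).length = n.toNat := by omega
        rw [e1, e2, h] at hcomp
        simp at hcomp
      · rw [PySem.List.pyRange_one_eq_nil (by omega : n + 1 ≤ 0)]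
        rfl
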